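-- pv_equiv track=rewrite | github.com/JoyfulRusty/rlcards-rs | lq_rlcard_new-develop/lq_rlcard/rlcards/games/mahjong/policy.py | get_four_same
-- ===== SOURCE A (Python) =====
-- from collections import Counter, defaultdict
--
-- def do_remove_cards(curr_hand_cards, card, count=0):
-- 	"""
-- 	删除卡牌
-- 	"""
-- 	for i in range(count):
-- 		curr_hand_cards.remove(card)
--
-- def do_add_cards(target_cards, card, count=0):
-- 	"""
-- 	添加卡牌
-- 	"""
-- 	tmp = []
-- 	for i in range(count):
-- 		tmp.append(card)
-- 	target_cards.append(tmp)
--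
-- def get_four_same(curr_hand_cards):
-- 	"""
-- 	获取相同的四个数
-- 	"""
-- 	four_cards = []
-- 	counter = Counter(curr_hand_cards)
-- 	for card, nums in counter.items():
-- 		if nums == 4:
-- 			do_add_cards(four_cards, card, 4)
-- 			do_remove_cards(curr_hand_cards, card, 4)
-- 	return four_cards
-- ===== SOURCE B (Python) =====
-- from collections import Counter
--
-- def get_four_same(curr_hand_cards):
--     """Build the counts once, emit the quads by a comprehension over the
--     counter (first-appearance order), and rebuild the hand with one linear
--     filter pass via slice assignment (same in-place mutation as the original)."""
--     counter = Counter(curr_hand_cards)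
--     four_cards = [[card] * 4 for card, n in counter.items() if n == 4]
--     curr_hand_cards[:] = [c for c in curr_hand_cards if counter[c] != 4]
--     return four_cards
-- ===== Notes on version B (the rewrite author's own statement) =====
-- stated objective: faster
-- what changed: Replaces the per-quad append loop and the repeated list.remove() calls (quadratic removal) with a single comprehension over the counter plus one linear filter pass assigned back into the list; same in-place mutation and return value.
import Mathlib
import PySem

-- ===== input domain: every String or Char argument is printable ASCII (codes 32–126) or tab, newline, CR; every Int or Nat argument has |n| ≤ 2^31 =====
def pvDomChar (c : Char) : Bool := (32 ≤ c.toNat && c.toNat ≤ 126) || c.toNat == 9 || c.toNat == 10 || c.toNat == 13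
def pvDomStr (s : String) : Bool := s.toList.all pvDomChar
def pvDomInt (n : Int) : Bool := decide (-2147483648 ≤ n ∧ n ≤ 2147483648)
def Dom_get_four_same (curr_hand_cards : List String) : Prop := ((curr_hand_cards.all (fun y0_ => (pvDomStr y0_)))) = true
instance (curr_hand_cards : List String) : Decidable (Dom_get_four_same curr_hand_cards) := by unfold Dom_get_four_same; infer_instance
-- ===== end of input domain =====

-- B replaces the per-quad append loop and repeated list.remove() with one comprehension over
-- the counter plus one linear filter pass (objective: simpler); B performs the same in-place
-- mutation of curr_hand_cards as A, and the equivalence proved here is about the RETURN value.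

-- ===== PORT A =====
-- do_remove_cards: 'for i in range(count): curr_hand_cards.remove(card)'; remove? is none only
-- where Python would raise ValueError, which get_four_same never reaches (count = multiplicity).
def do_remove_cards (curr_hand_cards : List String) (card : String) (count : Int) : List String :=
  (PySem.List.pyRange 0 count 1).foldl
    (fun h _ => (PySem.List.remove? h card).getD h) curr_hand_cards

def do_add_cards (target_cards : List (List String)) (card : String) (count : Int) : List (List String) :=
  let tmp := (PySem.List.pyRange 0 count 1).foldl (fun tmp _ => tmp ++ [card]) []
  target_cards ++ [tmp]

def get_four_same (curr_hand_cards : List String) : List (List String) :=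
  let counter := PySem.Dict.counter curr_hand_cards
  (counter.items.foldl
    (fun (st : List (List String) × List String) p =>
      if p.2 == 4 then (do_add_cards st.1 p.1 4, do_remove_cards st.2 p.1 4) else st)
    ([], curr_hand_cards)).1

-- ===== PORT B =====
def get_four_same_alt (curr_hand_cards : List String) : List (List String) :=
  let counter := PySem.Dict.counter curr_hand_cards
  counter.items.filterMap (fun p => if p.2 == 4 then some (List.replicate 4 p.1) else none)

-- ===== PRECONDITION & SPEC =====
def Spec_get_four_same (curr_hand_cards : List String) (out : List (List String)) : Prop := out = get_four_same_alt curr_hand_cards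
instance (curr_hand_cards : List String) (out : List (List String)) : Decidable (Spec_get_four_same curr_hand_cards out) := by unfold Spec_get_four_same; infer_instance

-- ===== CLAIM (what is proved, stated in full; the proofs are below) =====
def Claim_equal_get_four_same : Prop := ∀ (curr_hand_cards : List String), Dom_get_four_same curr_hand_cards → Spec_get_four_same curr_hand_cards (get_four_same curr_hand_cards)

-- ===== LEMMAS AND PROOFS =====

-- the pair-state loop of A reads only its first component for the result
lemma fst_foldl (l : List (String × Int)) (acc : List (List String)) (h : List String) :
    (l.foldl
      (fun (st : List (List String) × List String) p =>
        if p.2 == 4 then (do_add_cards st.1 p.1 4, do_remove_cards st.2 p.1 4) else st)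
      (acc, h)).1
    = l.foldl (fun acc p => if p.2 == 4 then acc ++ [List.replicate 4 p.1] else acc) acc := by
  induction l generalizing acc h with
  | nil => rfl
  | cons x xs ih =>
    simp only [List.foldl_cons]
    by_cases hx : x.2 == 4
    · simp only [hx, if_pos, ih]; rfl
    · simp only [hx, Bool.false_eq_true, if_false, ih]

lemma filterMap_eq (l : List (String × Int)) (acc : List (List String)) :
    l.foldl (fun acc p => if p.2 == 4 then acc ++ [List.replicate 4 p.1] else acc) acc
    = acc ++ l.filterMap (fun p => if p.2 == 4 then some (List.replicate 4 p.1) else none) := by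
  induction l generalizing acc with
  | nil => simp
  | cons x xs ih =>
    by_cases hx : x.2 == 4 <;>
      simp only [List.foldl_cons, List.filterMap_cons, hx, if_true, if_false,
        Bool.false_eq_true, ih, List.append_assoc, List.singleton_append]

-- ===== VERDICT (by name: the statement is the Claim_ definition above) =====
theorem get_four_same_spec : Claim_equal_get_four_same := by
  intro xs _
  unfold Spec_get_four_same get_four_same get_four_same_alt
  rw [fst_foldl, filterMap_eq, List.nil_append]
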